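-- pv_equiv track=rewrite | github.com/mylin102/tw-canslim-web | publish_safety.py | _extract_bundle_run_id
-- ===== SOURCE A (Python) =====
-- from typing import Any
--
-- def _extract_bundle_run_id(normalized: list[dict[str, Any]]) -> str | None:
--     run_ids = {
--         artifact["payload"].get("run_id")
--         for artifact in normalized
--         if isinstance(artifact.get("payload"), dict) and artifact["payload"].get("run_id") is not None
--     }
--     if len(run_ids) == 1:
--         return next(iter(run_ids))
--     return None
-- ===== SOURCE B (Python) =====
-- def _extract_bundle_run_id(normalized):
--     candidate = None
--     for artifact in normalized:
--         payload = artifact.get("payload")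
--         if not isinstance(payload, dict):
--             continue
--         rid = payload.get("run_id")
--         if rid is None:
--             continue
--         if candidate is None:
--             candidate = rid
--         elif candidate != rid:
--             return None
--     return candidate
-- ===== Notes on version B (the rewrite author's own statement) =====
-- stated objective: simpler
-- what changed: Replaces the set comprehension plus len==1/next(iter(...)) with a single pass that keeps one scalar candidate and returns None as soon as a second distinct run_id is seen.
import Mathlib
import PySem

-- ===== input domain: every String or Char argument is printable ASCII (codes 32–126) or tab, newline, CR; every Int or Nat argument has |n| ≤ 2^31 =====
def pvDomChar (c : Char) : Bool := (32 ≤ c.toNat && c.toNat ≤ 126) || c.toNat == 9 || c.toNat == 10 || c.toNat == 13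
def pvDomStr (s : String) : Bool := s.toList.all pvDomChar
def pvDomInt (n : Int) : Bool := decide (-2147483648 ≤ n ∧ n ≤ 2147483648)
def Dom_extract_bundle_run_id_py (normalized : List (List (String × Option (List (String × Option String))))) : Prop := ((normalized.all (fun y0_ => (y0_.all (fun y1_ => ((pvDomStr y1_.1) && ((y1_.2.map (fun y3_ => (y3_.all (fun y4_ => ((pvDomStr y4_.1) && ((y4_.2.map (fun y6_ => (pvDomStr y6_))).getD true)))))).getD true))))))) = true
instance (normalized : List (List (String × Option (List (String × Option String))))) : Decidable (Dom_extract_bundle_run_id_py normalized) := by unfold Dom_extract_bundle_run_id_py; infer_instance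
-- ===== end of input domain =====

-- B replaces A's set comprehension + len==1 check with a single scan keeping one
-- scalar candidate, returning None as soon as a second distinct run_id appears (simpler).


-- ===== PORT A =====
-- the comprehension's guard + extraction, shared by both Pythons verbatim:
-- isinstance(artifact.get("payload"), dict) and artifact["payload"].get("run_id") is not None
def pvRunId (artifact : List (String × Option (List (String × Option String)))) : Option String :=
  match artifact.lookup "payload" with
  | some (some payload) =>               -- payload present and a dict
      match payload.lookup "run_id" with
      | some (some rid) => some rid      -- run_id present and not None
      | _ => none
  | _ => none

def extract_bundle_run_id_py (normalized : List (List (String × Option (List (String × Option String))))) : Option String :=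
  let run_ids : PySem.Set String := PySem.Set.ofList (normalized.filterMap pvRunId)
  if run_ids.length = 1 then run_ids.head? else none

-- ===== PORT B =====
-- the for-loop of Source B: candidate accumulator, early return None on a second distinct id
def pvScanB : List (List (String × Option (List (String × Option String)))) → Option String → Option String
  | [], cand => cand
  | a :: rest, cand =>
    match pvRunId a with
    | none => pvScanB rest cand
    | some rid =>
      match cand with
      | none => pvScanB rest (some rid)
      | some c => if c = rid then pvScanB rest cand else none

def extract_bundle_run_id_py_alt (normalized : List (List (String × Option (List (String × Option String))))) : Option String :=
  pvScanB normalized none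

-- ===== PRECONDITION & SPEC =====
def Spec_extract_bundle_run_id_py (normalized : List (List (String × Option (List (String × Option String))))) (out : Option String) : Prop := out = extract_bundle_run_id_py_alt normalized
instance (normalized : List (List (String × Option (List (String × Option String))))) (out : Option String) : Decidable (Spec_extract_bundle_run_id_py normalized out) := by unfold Spec_extract_bundle_run_id_py; infer_instance

-- ===== CLAIM (what is proved, stated in full; the proofs are below) =====
def Claim_equal_extract_bundle_run_id_py : Prop := ∀ (normalized : List (List (String × Option (List (String × Option String))))), Dom_extract_bundle_run_id_py normalized → Spec_extract_bundle_run_id_py normalized (extract_bundle_run_id_py normalized)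

-- ===== LEMMAS AND PROOFS =====

-- B's loop only looks at the extracted run_ids, in order
def pvScanStr : List String → Option String → Option String
  | [], cand => cand
  | rid :: rest, cand =>
    match cand with
    | none => pvScanStr rest (some rid)
    | some c => if c = rid then pvScanStr rest cand else none

theorem pvScanB_eq_scanStr (l : List (List (String × Option (List (String × Option String))))) (cand : Option String) :
    pvScanB l cand = pvScanStr (l.filterMap pvRunId) cand := by
  induction l generalizing cand with
  | nil => rfl
  | cons a rest ih =>
    simp only [pvScanB, List.filterMap_cons]
    cases h : pvRunId a with
    | none => exact ih cand
    | some rid =>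
      cases cand with
      | none => simp [pvScanStr, ih]
      | some c =>
        simp only [pvScanStr]
        split_ifs with hc
        · exact ih _
        · rfl

theorem pvScanStr_some (rest : List String) (c : String) :
    pvScanStr rest (some c) = if ∀ y ∈ rest, y = c then some c else none := by
  induction rest with
  | nil => simp [pvScanStr]
  | cons y rest ih =>
    simp only [pvScanStr]
    by_cases hy : c = y
    · subst hy; simp [ih]
    · rw [if_neg hy, if_neg]
      intro h
      exact hy ((h y (by simp)).symm)

theorem pv_nodup_all_eq {l : List String} {x : String}
    (hnd : l.Nodup) (hall : ∀ y ∈ l, y = x) (hmem : x ∈ l) : l = [x] := by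
  cases l with
  | nil => cases hmem
  | cons a t =>
    have ha : a = x := hall a (by simp)
    subst ha
    cases t with
    | nil => rfl
    | cons b t' =>
      have hb : b = a := hall b (by simp)
      simp [hb] at hnd

-- the core fact: "set has exactly one element → that element" = the candidate scan
theorem pv_set_eq_scan (xs : List String) :
    (if (PySem.Set.ofList xs).length = 1 then (PySem.Set.ofList xs).head? else none)
      = pvScanStr xs none := by
  cases xs with
  | nil => rfl
  | cons x rest =>
    simp only [pvScanStr]
    rw [pvScanStr_some]
    by_cases hall : ∀ y ∈ rest, y = x
    · have hset : PySem.Set.ofList (x :: rest) = [x] := by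
        apply pv_nodup_all_eq (PySem.Set.nodup_ofList _)
        · intro y hy
          rw [PySem.Set.mem_ofList, List.mem_cons] at hy
          rcases hy with rfl | hy
          · rfl
          · exact hall y hy
        · rw [PySem.Set.mem_ofList]; simp
      simp only [hset, List.length_cons, List.length_nil]
      rw [if_pos trivial, if_pos hall]
      rfl
    · rw [not_forall] at hall
      simp only [not_forall, exists_prop] at hall
      obtain ⟨y, hy, hyx⟩ := hall
      rw [if_neg, if_neg]
      · intro h; exact hyx (h y hy)
      · intro hlen
        obtain ⟨c, hc⟩ := List.length_eq_one_iff.mp hlen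
        have hx : x ∈ PySem.Set.ofList (x :: rest) := by rw [PySem.Set.mem_ofList]; simp
        have hy' : y ∈ PySem.Set.ofList (x :: rest) := by rw [PySem.Set.mem_ofList]; simp [hy]
        rw [hc] at hx hy'
        simp at hx hy'
        exact hyx (hy'.trans hx.symm)

-- ===== VERDICT (by name: the statement is the Claim_ definition above) =====
theorem extract_bundle_run_id_py_spec : Claim_equal_extract_bundle_run_id_py := by
  intro normalized _
  unfold Spec_extract_bundle_run_id_py extract_bundle_run_id_py extract_bundle_run_id_py_alt
  rw [pvScanB_eq_scanStr]
  exact pv_set_eq_scan _
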